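-- pv_equiv track=rewrite | github.com/10639780/proti | helpers.py | xyz_double
-- ===== SOURCE A (Python) =====
-- def direction_to_xyz(string):
--     """Converts a series of string with directions like ['L', 'R', 'U', 'D'] to lists with xyz positions."""
--
--     pos_x = [0, 1]
--     pos_y = [0, 0]
--     pos_z = [0, 0]
--     # go over every node
--     for s in string:
--
--         # previous direction is determined
--         delta_x = pos_x[-1] - pos_x[-2]
--         delta_y = pos_y[-1] - pos_y[-2]
--         delta_z = pos_z[-1] - pos_z[-2]
--
--         # rotation matrices used to turn into the desired direction
--         if s == 'S':
--             pos_x.append(pos_x[-1] + delta_x)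
--             pos_y.append(pos_y[-1] + delta_y)
--             pos_z.append(pos_z[-1] + delta_z)
--
--         elif s == 'L':
--             pos_x.append(pos_x[-1] - delta_y)
--             pos_y.append(pos_y[-1] + delta_x)
--             pos_z.append(pos_z[-1] + delta_z)
--
--         elif s == 'R':
--             pos_x.append(pos_x[-1] + delta_y)
--             pos_y.append(pos_y[-1] - delta_x)
--             pos_z.append(pos_z[-1] + delta_z)
--
--         elif s == 'U':
--             pos_x.append(pos_x[-1] - delta_z)
--             pos_y.append(pos_y[-1] + delta_y)
--             pos_z.append(pos_z[-1] + delta_x)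
--
--         elif s == 'D':
--             pos_x.append(pos_x[-1] + delta_z)
--             pos_y.append(pos_y[-1] + delta_y)
--             pos_z.append(pos_z[-1] - delta_x)
--
--     return pos_x, pos_y, pos_z
--
-- def xyz_double(string):
--     """Checks whether two atoms occupy the same point."""
--
--     list_x, list_y, list_z = direction_to_xyz(string)
--     coordinates = []
--     # see if a coordinate is already in the list, then add that coordinate to the list
--     for x, y, z in zip(list_x, list_y, list_z):
--         if [x, y, z] in coordinates:
--             return True
--         coordinates.append([x, y, z])
--
--     return False
-- ===== SOURCE B (Python) =====
-- def xyz_double(string):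
--     """Checks whether two atoms occupy the same point."""
--     # Single pass: generate each next point from (prev, curr) and test it
--     # against a set of the points seen so far; the three coordinate lists
--     # are never built.
--     prev, curr = (0, 0, 0), (1, 0, 0)
--     seen = {prev, curr}
--     for s in string:
--         dx, dy, dz = curr[0] - prev[0], curr[1] - prev[1], curr[2] - prev[2]
--         if s == 'S':
--             nxt = (curr[0] + dx, curr[1] + dy, curr[2] + dz)
--         elif s == 'L':
--             nxt = (curr[0] - dy, curr[1] + dx, curr[2] + dz)
--         elif s == 'R':
--             nxt = (curr[0] + dy, curr[1] - dx, curr[2] + dz)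
--         elif s == 'U':
--             nxt = (curr[0] - dz, curr[1] + dy, curr[2] + dx)
--         elif s == 'D':
--             nxt = (curr[0] + dz, curr[1] + dy, curr[2] - dx)
--         else:
--             continue
--         if nxt in seen:
--             return True
--         seen.add(nxt)
--         prev, curr = curr, nxt
--     return False
-- ===== Notes on version B (the rewrite author's own statement) =====
-- stated objective: alternative
-- what changed: B inlines the walk generation into the collision test in a single pass keeping only the last two points and a hash set of visited points, instead of A's two-phase build-three-coordinate-lists then rescan with a linear list-membership test per point.
import Mathlib
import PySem

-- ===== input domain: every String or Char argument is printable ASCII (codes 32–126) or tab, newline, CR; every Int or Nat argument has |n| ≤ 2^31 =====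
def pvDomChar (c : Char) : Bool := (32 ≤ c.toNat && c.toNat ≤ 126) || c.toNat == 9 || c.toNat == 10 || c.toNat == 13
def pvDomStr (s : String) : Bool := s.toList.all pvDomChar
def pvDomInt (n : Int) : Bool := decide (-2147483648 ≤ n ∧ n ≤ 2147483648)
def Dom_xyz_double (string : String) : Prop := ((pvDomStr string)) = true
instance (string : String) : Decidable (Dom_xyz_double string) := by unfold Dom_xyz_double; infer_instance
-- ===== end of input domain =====

-- B replaces A's build-three-coordinate-lists-then-quadratic-scan by a single
-- generate-and-test pass keeping only (prev, curr) and a set of seen points.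

-- ===== PORT A =====
-- one iteration of direction_to_xyz's loop; pos_x[-1]/pos_x[-2] always exist
-- (the lists start with 2 elements and only grow), so .getD 0 is never taken.
def dtxStep (st : List Int × List Int × List Int) (s : Char) :
    List Int × List Int × List Int :=
  let px := st.1; let py := st.2.1; let pz := st.2.2
  let lx := (PySem.List.pyGet? px (-1)).getD 0
  let ly := (PySem.List.pyGet? py (-1)).getD 0
  let lz := (PySem.List.pyGet? pz (-1)).getD 0
  let dx := lx - (PySem.List.pyGet? px (-2)).getD 0
  let dy := ly - (PySem.List.pyGet? py (-2)).getD 0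
  let dz := lz - (PySem.List.pyGet? pz (-2)).getD 0
  if s = 'S' then (px ++ [lx + dx], py ++ [ly + dy], pz ++ [lz + dz])
  else if s = 'L' then (px ++ [lx - dy], py ++ [ly + dx], pz ++ [lz + dz])
  else if s = 'R' then (px ++ [lx + dy], py ++ [ly - dx], pz ++ [lz + dz])
  else if s = 'U' then (px ++ [lx - dz], py ++ [ly + dy], pz ++ [lz + dx])
  else if s = 'D' then (px ++ [lx + dz], py ++ [ly + dy], pz ++ [lz - dx])
  else (px, py, pz)

def direction_to_xyz (string : String) :
    List Int × List Int × List Int :=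
  string.toList.foldl dtxStep ([0, 1], [0, 0], [0, 0])

-- zip(list_x, list_y, list_z) over three lists
def pvZip3 : List Int → List Int → List Int → List (Int × Int × Int)
  | x :: xs, y :: ys, z :: zs => (x, y, z) :: pvZip3 xs ys zs
  | _, _, _ => []

-- the membership-scan loop of xyz_double
def xyzLoop (coords : List (Int × Int × Int)) :
    List (Int × Int × Int) → Bool
  | [] => false
  | p :: rest => if p ∈ coords then true else xyzLoop (coords ++ [p]) rest

def xyz_double (string : String) : Bool :=
  let t := direction_to_xyz string
  xyzLoop [] (pvZip3 t.1 t.2.1 t.2.2)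

-- ===== PORT B =====
-- the next point from (prev, curr) under direction c; none = unknown char
def rotStep (prev curr : Int × Int × Int) (c : Char) :
    Option (Int × Int × Int) :=
  let dx := curr.1 - prev.1
  let dy := curr.2.1 - prev.2.1
  let dz := curr.2.2 - prev.2.2
  if c = 'S' then some (curr.1 + dx, curr.2.1 + dy, curr.2.2 + dz)
  else if c = 'L' then some (curr.1 - dy, curr.2.1 + dx, curr.2.2 + dz)
  else if c = 'R' then some (curr.1 + dy, curr.2.1 - dx, curr.2.2 + dz)
  else if c = 'U' then some (curr.1 - dz, curr.2.1 + dy, curr.2.2 + dx)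
  else if c = 'D' then some (curr.1 + dz, curr.2.1 + dy, curr.2.2 - dx)
  else none

def altLoop (prev curr : Int × Int × Int)
    (seen : PySem.Set (Int × Int × Int)) : List Char → Bool
  | [] => false
  | c :: rest =>
    match rotStep prev curr c with
    | none => altLoop prev curr seen rest
    | some nxt =>
      if nxt ∈ seen then true
      else altLoop curr nxt (PySem.Set.add seen nxt) rest

def xyz_double_alt (string : String) : Bool :=
  altLoop (0, 0, 0) (1, 0, 0)
    (PySem.Set.ofList [(0, 0, 0), (1, 0, 0)]) string.toList

-- ===== PRECONDITION & SPEC =====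
def Spec_xyz_double (string : String) (out : Bool) : Prop := out = xyz_double_alt string
instance (string : String) (out : Bool) : Decidable (Spec_xyz_double string out) := by unfold Spec_xyz_double; infer_instance

-- ===== CLAIM (what is proved, stated in full; the proofs are below) =====
def Claim_equal_xyz_double : Prop := ∀ (string : String), Dom_xyz_double string → Spec_xyz_double string (xyz_double string)

-- ===== LEMMAS AND PROOFS =====

-- the list of points the walk visits after (prev, curr), in order
def pts (prev curr : Int × Int × Int) : List Char → List (Int × Int × Int)
  | [] => []
  | c :: rest =>
    match rotStep prev curr c with
    | none => pts prev curr rest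
    | some n => n :: pts curr n rest

theorem pyGet_last2_snoc2 (l : List Int) (a b : Int) :
    (PySem.List.pyGet? (l ++ [a, b]) (-1)).getD 0 = b ∧
    (PySem.List.pyGet? (l ++ [a, b]) (-2)).getD 0 = a := by
  constructor
  · have : l ++ [a, b] = (l ++ [a]) ++ [b] := by simp
    rw [this, PySem.List.pyGet?_neg_one_append_singleton]; rfl
  · rw [PySem.List.pyGet?_neg_ofNat (l ++ [a, b]) 2 (by omega) (by simp)]
    simp

theorem dtxStep_snoc2 (lx ly lz : List Int) (a b : Int × Int × Int) (c : Char) :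
    dtxStep (lx ++ [a.1, b.1], ly ++ [a.2.1, b.2.1], lz ++ [a.2.2, b.2.2]) c =
      match rotStep a b c with
      | none => (lx ++ [a.1, b.1], ly ++ [a.2.1, b.2.1], lz ++ [a.2.2, b.2.2])
      | some n => (lx ++ [a.1, b.1, n.1], ly ++ [a.2.1, b.2.1, n.2.1],
                   lz ++ [a.2.2, b.2.2, n.2.2]) := by
  simp only [dtxStep, rotStep,
    (pyGet_last2_snoc2 lx a.1 b.1).1, (pyGet_last2_snoc2 lx a.1 b.1).2,
    (pyGet_last2_snoc2 ly a.2.1 b.2.1).1, (pyGet_last2_snoc2 ly a.2.1 b.2.1).2,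
    (pyGet_last2_snoc2 lz a.2.2 b.2.2).1, (pyGet_last2_snoc2 lz a.2.2 b.2.2).2]
  split_ifs <;> simp

theorem foldA (cs : List Char) :
    ∀ (lx ly lz : List Int) (a b : Int × Int × Int),
    List.foldl dtxStep
        (lx ++ [a.1, b.1], ly ++ [a.2.1, b.2.1], lz ++ [a.2.2, b.2.2]) cs =
      (lx ++ [a.1, b.1] ++ (pts a b cs).map (·.1),
       ly ++ [a.2.1, b.2.1] ++ (pts a b cs).map (·.2.1),
       lz ++ [a.2.2, b.2.2] ++ (pts a b cs).map (·.2.2)) := by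
  induction cs with
  | nil => intro lx ly lz a b; simp [pts]
  | cons c rest ih =>
    intro lx ly lz a b
    rw [List.foldl_cons, dtxStep_snoc2]
    cases h : rotStep a b c with
    | none => simp only [pts, h, ih lx ly lz a b]
    | some n =>
      have h1 : lx ++ [a.1, b.1, n.1] = (lx ++ [a.1]) ++ [b.1, n.1] := by simp
      have h2 : ly ++ [a.2.1, b.2.1, n.2.1] = (ly ++ [a.2.1]) ++ [b.2.1, n.2.1] := by simp
      have h3 : lz ++ [a.2.2, b.2.2, n.2.2] = (lz ++ [a.2.2]) ++ [b.2.2, n.2.2] := by simp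
      simp only [h1, h2, h3, ih (lx ++ [a.1]) (ly ++ [a.2.1]) (lz ++ [a.2.2]) b n,
        pts, h, List.map_cons]
      simp

theorem zip3_maps (L : List (Int × Int × Int)) :
    pvZip3 (L.map (·.1)) (L.map (·.2.1)) (L.map (·.2.2)) = L := by
  induction L with
  | nil => rfl
  | cons p rest ih => simp [pvZip3, ih]

theorem altLoop_eq_xyzLoop (cs : List Char) :
    ∀ (prev curr : Int × Int × Int) (seen : PySem.Set (Int × Int × Int)),
    altLoop prev curr seen cs = xyzLoop seen (pts prev curr cs) := by
  induction cs with
  | nil => intro prev curr seen; rfl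
  | cons c rest ih =>
    intro prev curr seen
    simp only [altLoop, pts]
    cases h : rotStep prev curr c with
    | none => exact ih prev curr seen
    | some n =>
      simp only [xyzLoop]
      by_cases hm : n ∈ seen
      · simp [hm]
      · simp only [hm, if_false]
        rw [PySem.Set.add_of_not_mem hm]
        simpa [hm] using ih curr n (seen ++ [n])

theorem xyz_double_eq_alt (s : String) : xyz_double s = xyz_double_alt s := by
  have hA : xyz_double s =
      xyzLoop [] ((0,0,0) :: (1,0,0) :: pts (0,0,0) (1,0,0) s.toList) := by
    have := foldA s.toList [] [] [] (0, 0, 0) (1, 0, 0)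
    simp only [xyz_double, direction_to_xyz]
    rw [show ([0, 1] : List Int) = [] ++ [(0:Int), 1] from rfl,
        show ([0, 0] : List Int) = [] ++ [(0:Int), 0] from rfl]
    rw [this]
    have : pvZip3
        ([] ++ [(0:Int), 1] ++ (pts (0,0,0) (1,0,0) s.toList).map (·.1))
        ([] ++ [(0:Int), 0] ++ (pts (0,0,0) (1,0,0) s.toList).map (·.2.1))
        ([] ++ [(0:Int), 0] ++ (pts (0,0,0) (1,0,0) s.toList).map (·.2.2)) =
        (0,0,0) :: (1,0,0) :: pts (0,0,0) (1,0,0) s.toList := by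
      simpa [pvZip3] using zip3_maps (pts (0,0,0) (1,0,0) s.toList)
    rw [this]
  rw [hA]
  simp only [xyzLoop]
  norm_num
  rw [show ([((0:Int),(0:Int),(0:Int)), ((1:Int),(0:Int),(0:Int))]) =
      PySem.Set.ofList [((0:Int),(0:Int),(0:Int)), ((1:Int),(0:Int),(0:Int))] by decide]
  exact (altLoop_eq_xyzLoop s.toList (0,0,0) (1,0,0) _).symm

-- ===== VERDICT (by name: the statement is the Claim_ definition above) =====
theorem xyz_double_spec : Claim_equal_xyz_double := by
  intro s _
  unfold Spec_xyz_double
  exact xyz_double_eq_alt s
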